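-- pv_equiv track=rewrite | github.com/kulbitski-andrei/Test | Task 7.py | funny_func
-- ===== SOURCE A (Python) =====
-- def funny_func(long_word, iterations):
--
--     funny_index = 0
--     text_to_return = ""
--
--     for i in range(iterations):
--         text_to_return += long_word[funny_index]
--         funny_index += 1
--     funny_index -= 1
--     for i in range(iterations - 1):
--         text_to_return += long_word[funny_index - 1]
--         funny_index -= 1
--     return text_to_return
-- ===== SOURCE B (Python) =====
-- def funny_func(long_word, iterations):
--     prefix = long_word[:max(iterations, 0)]
--     return prefix + prefix[:-1][::-1]
-- ===== Notes on version B (the rewrite author's own statement) =====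
-- stated objective: simpler
-- what changed: A appends characters one by one in two index-walking loops (quadratic string concatenation); B builds the prefix with a single slice and mirrors it with prefix[:-1][::-1], no explicit loops or index bookkeeping.
import Mathlib
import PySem

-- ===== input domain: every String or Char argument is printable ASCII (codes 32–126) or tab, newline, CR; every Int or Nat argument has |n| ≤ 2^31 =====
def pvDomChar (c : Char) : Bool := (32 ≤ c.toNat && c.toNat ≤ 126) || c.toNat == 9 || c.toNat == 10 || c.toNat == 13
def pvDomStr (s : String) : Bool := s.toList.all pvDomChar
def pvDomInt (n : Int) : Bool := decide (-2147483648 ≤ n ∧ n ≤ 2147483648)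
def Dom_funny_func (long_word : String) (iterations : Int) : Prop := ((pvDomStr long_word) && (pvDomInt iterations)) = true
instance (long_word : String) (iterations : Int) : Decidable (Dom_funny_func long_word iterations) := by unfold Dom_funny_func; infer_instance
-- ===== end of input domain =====

-- B replaces A's two character-append loops by one slice plus a mirrored slice (simpler); equal wherever A returns.

-- ===== PORT A =====
-- first loop: text += long_word[funny_index]; funny_index += 1   (state: (funny_index, text); none = IndexError)
def funny_func (long_word : String) (iterations : Int) : String :=
  let w := long_word.toList
  let st1 := (PySem.List.pyRange 0 iterations 1).foldl
    (fun (st : Option (Int × List Char)) _ =>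
      st.bind (fun p => (PySem.List.pyGet? w p.1).map (fun c => (p.1 + 1, p.2 ++ [c]))))
    (some ((0 : Int), ([] : List Char)))
  match st1 with
  | none => ""
  | some p1 =>
    -- funny_index -= 1; second loop: text += long_word[funny_index - 1]; funny_index -= 1
    let st2 := (PySem.List.pyRange 0 (iterations - 1) 1).foldl
      (fun (st : Option (Int × List Char)) _ =>
        st.bind (fun p => (PySem.List.pyGet? w (p.1 - 1)).map (fun c => (p.1 - 1, p.2 ++ [c]))))
      (some (p1.1 - 1, p1.2))
    match st2 with
    | none => ""
    | some p2 => String.ofList p2.2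

-- ===== PORT B =====
-- prefix = long_word[:max(iterations, 0)]; return prefix + prefix[:-1][::-1]
def funny_func_alt (long_word : String) (iterations : Int) : String :=
  let pre := PySem.List.slice long_word.toList none (some (max iterations 0))
  let mirror := (PySem.List.slice? (PySem.List.slice pre none (some (-1))) none none (-1)).getD []
  String.ofList (pre ++ mirror)

-- ===== PRECONDITION & SPEC =====
-- A raises IndexError exactly when iterations > len(long_word); those inputs are excluded.
def Pre_funny_func (long_word : String) (iterations : Int) : Prop :=
  iterations ≤ (long_word.toList.length : Int)
instance (long_word : String) (iterations : Int) : Decidable (Pre_funny_func long_word iterations) := by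
  unfold Pre_funny_func; infer_instance
def pvWitness_funny_func : String × Int := ("hello", 3)

def Spec_funny_func (long_word : String) (iterations : Int) (out : String) : Prop := out = funny_func_alt long_word iterations
instance (long_word : String) (iterations : Int) (out : String) : Decidable (Spec_funny_func long_word iterations out) := by unfold Spec_funny_func; infer_instance

-- ===== CLAIM (what is proved, stated in full; the proofs are below) =====
def Claim_equal_funny_func : Prop := ∀ (long_word : String) (iterations : Int), Dom_funny_func long_word iterations → Pre_funny_func long_word iterations → Spec_funny_func long_word iterations (funny_func long_word iterations)

-- ===== LEMMAS AND PROOFS =====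

-- first loop over range(n): builds (n, take n w) when n ≤ |w|
theorem funny_loop1 (w : List Char) (n : Nat) (h : n ≤ w.length) :
    (PySem.List.pyRange 0 (n : Int) 1).foldl
      (fun (st : Option (Int × List Char)) _ =>
        st.bind (fun p => (PySem.List.pyGet? w p.1).map (fun c => (p.1 + 1, p.2 ++ [c]))))
      (some ((0 : Int), ([] : List Char)))
    = some ((n : Int), w.take n) := by
  induction n with
  | zero => simp [PySem.List.pyRange]
  | succ k ih =>
    have hk : (k : Int) ≤ (k : Int) + 1 := by omega
    have hrange : PySem.List.pyRange 0 ((k : Int) + 1) 1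
        = PySem.List.pyRange 0 (k : Int) 1 ++ [(k : Int)] := by
      simpa using PySem.List.pyRange_one_succ_right (a := 0) (b := (k : Int)) (by omega)
    have hget : PySem.List.pyGet? w (k : Int) = some w[k] := by
      simp [PySem.List.pyGet?, PySem.List.pyIdx?, Nat.lt_of_succ_le h]
      rfl
    have htake : w.take (k + 1) = w.take k ++ [w[k]] := by
      rw [List.take_add_one]
      simp [List.getElem?_eq_getElem (Nat.lt_of_succ_le h)]
    push_cast
    rw [hrange, List.foldl_append, ih (by omega)]
    simp only [List.foldl_cons, List.foldl_nil, Option.bind_some, hget, Option.map_some]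
    rw [htake]

-- second loop over range(m), starting index fi with m ≤ fi ≤ |w|:
-- appends w[fi-1], w[fi-2], …, w[fi-m] i.e. the reverse of w[fi-m : fi]
theorem funny_loop2 (w : List Char) (t : List Char) (m fi : Nat)
    (hm : m ≤ fi) (hfi : fi ≤ w.length) :
    (PySem.List.pyRange 0 (m : Int) 1).foldl
      (fun (st : Option (Int × List Char)) _ =>
        st.bind (fun p => (PySem.List.pyGet? w (p.1 - 1)).map (fun c => (p.1 - 1, p.2 ++ [c]))))
      (some ((fi : Int), t))
    = some (((fi - m : Nat) : Int), t ++ (((w.drop (fi - m)).take m).reverse)) := by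
  induction m with
  | zero => simp [PySem.List.pyRange]
  | succ k ih =>
    have hrange : PySem.List.pyRange 0 ((k : Int) + 1) 1
        = PySem.List.pyRange 0 (k : Int) 1 ++ [(k : Int)] := by
      simpa using PySem.List.pyRange_one_succ_right (a := 0) (b := (k : Int)) (by omega)
    have hidx : fi - k - 1 < w.length := by omega
    have hget : PySem.List.pyGet? w (((fi - k : Nat) : Int) - 1) = some w[fi - k - 1] := by
      have : ((fi - k : Nat) : Int) - 1 = ((fi - k - 1 : Nat) : Int) := by omega
      rw [this]
      simp [PySem.List.pyGet?, PySem.List.pyIdx?, hidx]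
    push_cast
    rw [hrange, List.foldl_append, show ((fi : Int)) = ((fi : Nat) : Int) from rfl,
      ih (by omega)]
    simp only [List.foldl_cons, List.foldl_nil, Option.bind_some, hget, Option.map_some]
    have hdrop : w.drop (fi - (k + 1)) = w[fi - k - 1] :: w.drop (fi - k) := by
      have h1 : fi - (k + 1) = fi - k - 1 := by omega
      have h2 : fi - k - 1 + 1 = fi - k := by omega
      rw [h1, List.drop_eq_getElem_cons hidx, h2]
    have h1 : ((fi - k : Nat) : Int) - 1 = ((fi - (k + 1) : Nat) : Int) := by omega
    have h2 : (List.take (k + 1) (List.drop (fi - (k + 1)) w)).reverse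
        = (List.take k (List.drop (fi - k) w)).reverse ++ [w[fi - k - 1]] := by
      rw [hdrop, List.take_succ_cons]
      simp
    rw [h1, h2, List.append_assoc]

-- (take n w).dropLast = take (n-1) w  when n ≤ |w|
theorem take_dropLast (w : List Char) (n : Nat) (h : n ≤ w.length) :
    (w.take n).dropLast = w.take (n - 1) := by
  rw [List.dropLast_eq_take, List.take_take, List.length_take]
  congr 1
  omega

theorem funny_func_spec : Claim_equal_funny_func := by
  intro long_word iterations _ hpre
  unfold Spec_funny_func funny_func funny_func_alt
  unfold Pre_funny_func at hpre
  by_cases hpos : iterations ≤ 0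
  · have h1 : PySem.List.pyRange 0 iterations 1 = [] := by
      simp [PySem.List.pyRange]; omega
    have h2 : PySem.List.pyRange 0 (iterations - 1) 1 = [] := by
      simp [PySem.List.pyRange]; omega
    have hmax : max iterations 0 = ((0 : Nat) : Int) := by simp; omega
    rw [h1, h2, hmax, PySem.List.slice_to_natCast]
    simp [PySem.List.slice, PySem.List.slice?]
  · -- iterations = n ≥ 1, n ≤ |w|
    obtain ⟨n, hn⟩ : ∃ n : Nat, iterations = (n : Int) :=
      ⟨iterations.toNat, by omega⟩
    have hn1 : 1 ≤ n := by omega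
    have hnw : n ≤ long_word.toList.length := by
      rw [hn] at hpre; exact_mod_cast hpre
    subst hn
    dsimp only
    rw [funny_loop1 long_word.toList n hnw]
    dsimp only
    have hsub : ((n : Int)) - 1 = ((n - 1 : Nat) : Int) := by omega
    rw [hsub, funny_loop2 long_word.toList (long_word.toList.take n) (n - 1) (n - 1)
      (le_refl _) (by omega)]
    have hmax : max ((n : Int)) 0 = ((n : Nat) : Int) := by omega
    rw [hmax, PySem.List.slice_to_natCast, PySem.List.slice_to_neg_one,
      PySem.List.slice?_none_none_neg_one]
    simp only [Option.getD_some]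
    rw [take_dropLast long_word.toList n hnw]
    simp
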